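-- pv_equiv track=rewrite | github.com/kismetgerald/Evaluate-STIG-Mods4VatesVMS | .Mods_by_Kismet/Helper_Scripts/fix_batch3b_answerfile_schema.py | fix_validation_code
-- ===== SOURCE A (Python) =====
-- def fix_validation_code(content):
--     """
--     Add <ValidationCode>None</ValidationCode> before every <ValidTrueStatus>
--     that doesn't already have a ValidationCode before it.
--
--     This fixes the schema validation error where ValidationCode is required
--     but missing from answer entries.
--     """
--     fixes_applied = 0
--
--     # Pattern: Find <ValidTrueStatus> that is NOT preceded by <ValidationCode>
--     # We need to match the indentation and add ValidationCode at the same level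
--
--     # Split content into lines for processing
--     lines = content.split('\n')
--     new_lines = []
--
--     i = 0
--     while i < len(lines):
--         line = lines[i]
--
--         # Check if this line contains <ValidTrueStatus>
--         if '<ValidTrueStatus>' in line:
--             # Check if the previous non-empty line contains <ValidationCode>
--             # Look backwards to find the last non-empty line
--             prev_idx = i - 1
--             while prev_idx >= 0 and lines[prev_idx].strip() == '':
--                 prev_idx -= 1
--
--             prev_line = lines[prev_idx] if prev_idx >= 0 else ''
--
--             # If previous line doesn't have ValidationCode, we need to add it
--             if '<ValidationCode>' not in prev_line:
--                 # Extract indentation from current line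
--                 indent = len(line) - len(line.lstrip())
--                 indent_str = ' ' * indent
--
--                 # Add ValidationCode line before ValidTrueStatus
--                 validation_line = f"{indent_str}<ValidationCode>None</ValidationCode>"
--                 new_lines.append(validation_line)
--                 fixes_applied += 1
--
--         new_lines.append(line)
--         i += 1
--
--     return '\n'.join(new_lines), fixes_applied
-- ===== SOURCE B (Python) =====
-- def fix_validation_code(content):
--     """Single forward pass: track the last non-empty original line instead of
--     scanning backwards for it at each <ValidTrueStatus>."""
--     fixes_applied = 0
--     out = []
--     last_nonempty = ''
--     for line in content.split('\n'):
--         if '<ValidTrueStatus>' in line and '<ValidationCode>' not in last_nonempty: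
--             indent = len(line) - len(line.lstrip())
--             out.append(' ' * indent + '<ValidationCode>None</ValidationCode>')
--             fixes_applied += 1
--         out.append(line)
--         if line.strip() != '':
--             last_nonempty = line
--     return '\n'.join(out), fixes_applied
-- ===== Notes on version B (the rewrite author's own statement) =====
-- stated objective: simpler
-- what changed: Replaces A's inner backward while-loop (re-scanning past blank lines before every <ValidTrueStatus>) by a single forward pass that maintains the last non-empty line seen as running state.
import Mathlib
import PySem

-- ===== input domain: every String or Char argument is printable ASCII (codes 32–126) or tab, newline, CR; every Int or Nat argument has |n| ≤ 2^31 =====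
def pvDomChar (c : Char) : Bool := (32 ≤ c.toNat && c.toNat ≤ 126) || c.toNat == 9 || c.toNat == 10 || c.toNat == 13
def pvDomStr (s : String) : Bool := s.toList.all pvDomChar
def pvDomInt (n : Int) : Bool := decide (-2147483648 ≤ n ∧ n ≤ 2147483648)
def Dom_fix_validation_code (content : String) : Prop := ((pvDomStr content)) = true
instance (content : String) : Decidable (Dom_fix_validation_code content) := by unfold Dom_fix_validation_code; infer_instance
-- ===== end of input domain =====

-- B replaces A's inner backward scan for the previous non-empty line by single-pass
-- state maintenance (objective: simpler); same return value everywhere.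

-- ===== PORT A =====
-- f"{' ' * indent}<ValidationCode>None</ValidationCode>" where indent = len(line) - len(line.lstrip())
-- (both Pythons build this line by the identical expression, so the helper is shared)
def pvVLine (line : String) : String :=
  String.ofList (List.replicate (PySem.Str.len line - PySem.Str.len (PySem.Str.lstrip line)).toNat ' '
             ++ "<ValidationCode>None</ValidationCode>".toList)

-- content.split('\n'); PySem.Chars.splitOn is the sep ≠ "" form of str.split (exact);
-- both Pythons split identically, so the helper is shared
def pvSplitNL (s : String) : List String :=
  (PySem.Chars.splitOn s.toList ['\n']).map String.ofList

-- A's inner `while prev_idx >= 0 and lines[prev_idx].strip() == '': prev_idx -= 1`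
-- followed by `prev_line = lines[prev_idx] if prev_idx >= 0 else ''`; argument n = prev_idx + 1
def pvA_back (lines : List String) : Nat → String
  | 0 => ""
  | n + 1 =>
    if PySem.Str.strip (lines.getD n "") = "" then pvA_back lines n else lines.getD n ""

-- A's outer `while i < len(lines)` loop
def pvA_loop (lines : List String) (i : Nat) (acc : List String) (fixes : Int) :
    List String × Int :=
  if _h : i < lines.length then
    let line := lines.getD i ""
    if PySem.Str.isIn "<ValidTrueStatus>" line then
      let prev_line := pvA_back lines i
      if !(PySem.Str.isIn "<ValidationCode>" prev_line) then
        pvA_loop lines (i + 1) (acc ++ [pvVLine line, line]) (fixes + 1)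
      else
        pvA_loop lines (i + 1) (acc ++ [line]) fixes
    else
      pvA_loop lines (i + 1) (acc ++ [line]) fixes
  else (acc, fixes)
termination_by lines.length - i

def fix_validation_code (content : String) : String × Int :=
  let lines := pvSplitNL content
  let r := pvA_loop lines 0 [] 0
  (PySem.Str.join "\n" r.1, r.2)

-- ===== PORT B =====
-- B's single forward pass: `last` is the most recent non-empty original line
def pvB_go : List String → List String → Int → String → List String × Int
  | [], acc, fixes, _ => (acc, fixes)
  | line :: rest, acc, fixes, last =>
    let p :=
      if PySem.Str.isIn "<ValidTrueStatus>" line && !(PySem.Str.isIn "<ValidationCode>" last)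
      then (acc ++ [pvVLine line], fixes + 1)
      else (acc, fixes)
    pvB_go rest (p.1 ++ [line]) p.2 (if PySem.Str.strip line ≠ "" then line else last)

def fix_validation_code_alt (content : String) : String × Int :=
  let lines := pvSplitNL content
  let r := pvB_go lines [] 0 ""
  (PySem.Str.join "\n" r.1, r.2)

-- ===== PRECONDITION & SPEC =====
def Spec_fix_validation_code (content : String) (out : String × Int) : Prop := out = fix_validation_code_alt content
instance (content : String) (out : String × Int) : Decidable (Spec_fix_validation_code content out) := by unfold Spec_fix_validation_code; infer_instance

-- ===== CLAIM (what is proved, stated in full; the proofs are below) =====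
def Claim_equal_fix_validation_code : Prop := ∀ (content : String), Dom_fix_validation_code content → Spec_fix_validation_code content (fix_validation_code content)

-- ===== LEMMAS AND PROOFS =====

-- B's `last` state after the first i lines equals what A's backward scan finds at index i
lemma pv_main (lines : List String) :
    ∀ n i acc fixes, lines.length - i ≤ n →
      pvA_loop lines i acc fixes = pvB_go (lines.drop i) acc fixes (pvA_back lines i) := by
  intro n
  induction n with
  | zero =>
    intro i acc fixes h
    have hi : ¬ i < lines.length := by omega
    rw [pvA_loop, List.drop_eq_nil_of_le (by omega)]
    simp [hi, pvB_go]
  | succ n ih =>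
    intro i acc fixes h
    by_cases hi : i < lines.length
    · have hdrop : lines.drop i = lines[i] :: lines.drop (i + 1) :=
        (List.getElem_cons_drop hi).symm
      have hgetD : lines.getD i "" = lines[i] := List.getD_eq_getElem lines "" hi
      have hback : pvA_back lines (i + 1) =
          if PySem.Str.strip lines[i] = "" then pvA_back lines i else lines[i] := by
        simp only [pvA_back, hgetD]
      rw [pvA_loop, hdrop, pvB_go]
      simp only [hi, dif_pos, hgetD]
      cases h1 : PySem.Str.isIn "<ValidTrueStatus>" lines[i] <;>
        cases h2 : PySem.Str.isIn "<ValidationCode>" (pvA_back lines i) <;>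
        simp [h1, h2, ← hback] <;>
        exact ih (i + 1) _ _ (by omega)
    · rw [pvA_loop, List.drop_eq_nil_of_le (by omega)]
      simp [hi, pvB_go]

-- ===== VERDICT (by name: the statement is the Claim_ definition above) =====
theorem fix_validation_code_spec : Claim_equal_fix_validation_code := by
  intro content _
  unfold Spec_fix_validation_code fix_validation_code fix_validation_code_alt
  show (PySem.Str.join "\n" (pvA_loop (pvSplitNL content) 0 [] 0).1,
        (pvA_loop (pvSplitNL content) 0 [] 0).2) =
       (PySem.Str.join "\n" (pvB_go (pvSplitNL content) [] 0 "").1,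
        (pvB_go (pvSplitNL content) [] 0 "").2)
  rw [pv_main (pvSplitNL content) (pvSplitNL content).length 0 [] 0 (by omega)]
  rfl
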